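-- pv_equiv track=rewrite | github.com/nexus-research-lab/nexus | agent/service/protocol/protocol_definition.py | _resolve_winner
-- ===== SOURCE A (Python) =====
-- from typing import Any, Optional, Protocol
--
-- def _resolve_winner(alive_agent_ids: list[str], roles: dict[str, str]) -> Optional[str]:
--     alive_wolves = [agent_id for agent_id in alive_agent_ids if roles.get(agent_id) == "wolf"]
--     alive_non_wolves = [agent_id for agent_id in alive_agent_ids if roles.get(agent_id) != "wolf"]
--     if not alive_wolves:
--         return "villagers"
--     if len(alive_wolves) >= len(alive_non_wolves):
--         return "wolves"
--     return None
-- ===== SOURCE B (Python) =====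
-- def _resolve_winner(alive_agent_ids: list, roles: dict):
--     # Cancellation scan: each wolf cancels one non-wolf; maintain the signed
--     # balance (wolves minus non-wolves) and a wolf-seen flag -- no counts,
--     # no lists, no len() comparison.
--     balance = 0
--     seen_wolf = False
--     for agent_id in alive_agent_ids:
--         if roles.get(agent_id) == "wolf":
--             balance += 1
--             seen_wolf = True
--         else:
--             balance -= 1
--     if not seen_wolf:
--         return "villagers"
--     return "wolves" if balance >= 0 else None
-- ===== Notes on version B (the rewrite author's own statement) =====
-- stated objective: simpler
-- what changed: Replaces A's two list-building comprehensions and length comparison with a one-pass cancellation scan that maintains a signed balance (wolf cancels non-wolf) and a wolf-seen flag; the verdict comes from the flag and the sign of the balance, with no lists, counts or len() comparison.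
import Mathlib
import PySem

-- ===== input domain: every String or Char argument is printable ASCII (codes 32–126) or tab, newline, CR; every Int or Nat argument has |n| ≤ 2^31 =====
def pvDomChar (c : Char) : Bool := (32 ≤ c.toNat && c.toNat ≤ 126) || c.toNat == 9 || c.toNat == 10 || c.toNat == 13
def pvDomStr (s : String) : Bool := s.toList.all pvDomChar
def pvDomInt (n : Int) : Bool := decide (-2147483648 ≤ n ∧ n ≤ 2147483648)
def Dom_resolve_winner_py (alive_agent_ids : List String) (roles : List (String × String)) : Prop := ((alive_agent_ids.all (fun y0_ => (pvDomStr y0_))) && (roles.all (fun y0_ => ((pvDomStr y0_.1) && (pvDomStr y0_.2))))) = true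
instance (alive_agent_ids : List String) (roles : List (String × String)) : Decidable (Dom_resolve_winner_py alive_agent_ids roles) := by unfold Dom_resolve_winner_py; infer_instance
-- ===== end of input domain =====

-- B replaces A's two list-building comprehensions and length comparison with a single
-- cancellation scan (signed wolves-minus-others balance plus a wolf-seen flag); simpler, same cost.

-- ===== PORT A =====
def resolve_winner_py (alive_agent_ids : List String) (roles : List (String × String)) : Option String :=
  let alive_wolves := alive_agent_ids.filter (fun agent_id => PySem.Dict.get? (PySem.Dict.mk roles) agent_id == some "wolf")
  let alive_non_wolves := alive_agent_ids.filter (fun agent_id => !(PySem.Dict.get? (PySem.Dict.mk roles) agent_id == some "wolf"))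
  if alive_wolves.isEmpty then some "villagers"
  else if alive_wolves.length ≥ alive_non_wolves.length then some "wolves"
  else none

-- ===== PORT B =====
def resolve_winner_py_alt (alive_agent_ids : List String) (roles : List (String × String)) : Option String :=
  let st : Int × Bool := alive_agent_ids.foldl
    (fun (st : Int × Bool) agent_id =>
      if PySem.Dict.get? (PySem.Dict.mk roles) agent_id == some "wolf" then (st.1 + 1, true)
      else (st.1 - 1, st.2))
    (0, false)
  if !st.2 then some "villagers"
  else if st.1 ≥ 0 then some "wolves"
  else none

-- ===== PRECONDITION & SPEC =====
def Spec_resolve_winner_py (alive_agent_ids : List String) (roles : List (String × String)) (out : Option String) : Prop := out = resolve_winner_py_alt alive_agent_ids roles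
instance (alive_agent_ids : List String) (roles : List (String × String)) (out : Option String) : Decidable (Spec_resolve_winner_py alive_agent_ids roles out) := by unfold Spec_resolve_winner_py; infer_instance

-- ===== CLAIM (what is proved, stated in full; the proofs are below) =====
def Claim_equal_resolve_winner_py : Prop := ∀ (alive_agent_ids : List String) (roles : List (String × String)), Dom_resolve_winner_py alive_agent_ids roles → Spec_resolve_winner_py alive_agent_ids roles (resolve_winner_py alive_agent_ids roles)

-- ===== LEMMAS AND PROOFS =====

-- The fold's state is (balance, seen): balance = b + #wolves - #nonwolves, seen = s || (#wolves > 0).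
theorem pv_fold_state (p : String → Bool) (l : List String) (b : Int) (s : Bool) :
    l.foldl (fun (st : Int × Bool) a => if p a then (st.1 + 1, true) else (st.1 - 1, st.2)) (b, s)
      = (b + ((l.filter p).length : Int) - ((l.filter (fun a => !(p a))).length : Int),
         s || !(l.filter p).isEmpty) := by
  induction l generalizing b s with
  | nil => simp
  | cons x xs ih =>
    simp only [List.foldl_cons, List.filter_cons]
    by_cases h : p x
    · simp only [h, if_true, ih, List.length_cons, List.isEmpty_cons, Bool.or_true]
      refine Prod.ext ?_ (by simp)
      simp only [Bool.not_true, if_false, List.length_cons]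
      push_cast; ring
    · simp only [h, if_false, Bool.not_false, ih, List.length_cons]
      refine Prod.ext ?_ rfl
      push_cast [List.length_cons]; ring

-- ===== VERDICT (by name: the statement is the Claim_ definition above) =====
theorem resolve_winner_py_spec : Claim_equal_resolve_winner_py := by
  intro alive roles _
  unfold Spec_resolve_winner_py resolve_winner_py resolve_winner_py_alt
  simp only [pv_fold_state, Bool.false_or, Bool.not_not]
  set w := (alive.filter (fun a => PySem.Dict.get? (PySem.Dict.mk roles) a == some "wolf"))
  set n := (alive.filter (fun a => !(PySem.Dict.get? (PySem.Dict.mk roles) a == some "wolf")))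
  by_cases he : w.isEmpty
  · simp [he]
  · have hw : 0 < w.length := by
      cases hw : w with
      | nil => simp [hw] at he
      | cons a l => simp [hw]
    simp only [he, if_false, Bool.false_eq_true, Bool.not_eq_true']
    have : ((0 : Int) + (w.length : Int) - (n.length : Int) ≥ 0) ↔ (w.length ≥ n.length) := by omega
    by_cases hge : w.length ≥ n.length
    · simp [hge, this.mpr hge, he]
    · simp only [hge, if_false, he]
      have : ¬ ((0 : Int) + (w.length : Int) - (n.length : Int) ≥ 0) := by omega
      simp [this]
      omega
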